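-- pv_equiv track=rewrite | github.com/eenock/Artificial-Intelligence-Assignments-2025 | week8_3.py | generate_task_table
-- ===== SOURCE A (Python) =====
-- from typing import List, Tuple, Dict, Any
--
-- def generate_task_table(campusbot_spec: Dict[str, bool]) -> str:
--     """
--     Generate the one-pager table: subtask → paradigm → algorithm → why
--
--     Args:
--         campusbot_spec: Dictionary of problem characteristics
--
--     Returns:
--         Formatted table string
--     """
--     tasks = {
--         "perception": {
--             "subtask": "Crosswalk Detection",
--             "paradigm": "Reflex-based (Model)",
--             "algorithm": "CNN",
--             "why": "Visual pattern recognition with spatial structure; abundant labeled image data; feedforward inference enables real-time detection"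
--         },
--         "path_planning": {
--             "subtask": "Route Planning (Static Map)",
--             "paradigm": "State-based (Search)",
--             "algorithm": "A*",
--             "why": "Deterministic transitions with known costs; admissible heuristic guarantees optimal paths; efficient exploration vs uninformed search"
--         },
--         "stochastic": {
--             "subtask": "Stochastic Travel Times",
--             "paradigm": "State-based (MDP)",
--             "algorithm": "Value Iteration",
--             "why": "Uncertain transition outcomes; optimizes expected cumulative reward; handles probabilistic travel time variations"
--         },
--         "hidden_state": {
--             "subtask": "Pedestrian Tracking",
--             "paradigm": "Variable-based (Probabilistic)",
--             "algorithm": "Forward-Backward (HMM)",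
--             "why": "Hidden states (true positions) with noisy observations; exact Bayesian inference; temporal smoothing using past and future evidence"
--         },
--         "logic_rules": {
--             "subtask": "Restricted Zones/Time Windows",
--             "paradigm": "Logic-based",
--             "algorithm": "Model Checking",
--             "why": "Hard constraints requiring verification; exhaustive satisfaction checking; no learning or probabilities needed"
--         }
--     }
--
--     # Generate formatted table
--     table = "\n"
--     table += "┌" + "─" * 33 + "┬" + "─" * 28 + "┬" + "─" * 24 + "┬" + "─" * 62 + "┐\n"
--     table += f"│ {'Subtask':<31} │ {'Paradigm':<26} │ {'Algorithm':<22} │ {'Justification':<60} │\n"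
--     table += "├" + "─" * 33 + "┼" + "─" * 28 + "┼" + "─" * 24 + "┼" + "─" * 62 + "┤\n"
--
--     for key, active in campusbot_spec.items():
--         if active and key in tasks:
--             task = tasks[key]
--             # Wrap long justification text
--             why_text = task['why']
--             why_lines = []
--             while len(why_text) > 60:
--                 split_pos = why_text[:60].rfind(' ')
--                 if split_pos == -1:
--                     split_pos = 60
--                 why_lines.append(why_text[:split_pos])
--                 why_text = why_text[split_pos:].strip()
--             why_lines.append(why_text)
--
--             # First line with all columns
--             table += f"│ {task['subtask']:<31} │ {task['paradigm']:<26} │ {task['algorithm']:<22} │ {why_lines[0]:<60} │\n"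
--
--             # Additional lines for wrapped text
--             for line in why_lines[1:]:
--                 table += f"│ {'':<31} │ {'':<26} │ {'':<22} │ {line:<60} │\n"
--
--     table += "└" + "─" * 33 + "┴" + "─" * 28 + "┴" + "─" * 24 + "┴" + "─" * 62 + "┘\n"
--
--     return table
-- ===== SOURCE B (Python) =====
-- def generate_task_table(campusbot_spec):
--     tasks = {
--         "perception": {
--             "subtask": "Crosswalk Detection",
--             "paradigm": "Reflex-based (Model)",
--             "algorithm": "CNN",
--             "why": "Visual pattern recognition with spatial structure; abundant labeled image data; feedforward inference enables real-time detection"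
--         },
--         "path_planning": {
--             "subtask": "Route Planning (Static Map)",
--             "paradigm": "State-based (Search)",
--             "algorithm": "A*",
--             "why": "Deterministic transitions with known costs; admissible heuristic guarantees optimal paths; efficient exploration vs uninformed search"
--         },
--         "stochastic": {
--             "subtask": "Stochastic Travel Times",
--             "paradigm": "State-based (MDP)",
--             "algorithm": "Value Iteration",
--             "why": "Uncertain transition outcomes; optimizes expected cumulative reward; handles probabilistic travel time variations"
--         },
--         "hidden_state": {
--             "subtask": "Pedestrian Tracking",
--             "paradigm": "Variable-based (Probabilistic)",
--             "algorithm": "Forward-Backward (HMM)",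
--             "why": "Hidden states (true positions) with noisy observations; exact Bayesian inference; temporal smoothing using past and future evidence"
--         },
--         "logic_rules": {
--             "subtask": "Restricted Zones/Time Windows",
--             "paradigm": "Logic-based",
--             "algorithm": "Model Checking",
--             "why": "Hard constraints requiring verification; exhaustive satisfaction checking; no learning or probabilities needed"
--         }
--     }
--
--     def wrap(text, width=60):
--         words = text.split()
--         lines = []
--         i = 0
--         while i < len(words):
--             rest = " ".join(words[i:])
--             if len(rest) <= width:
--                 lines.append(rest)
--                 break
--             cur = words[i]
--             i += 1
--             while i < len(words) and len(cur) + 1 + len(words[i]) < width: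
--                 cur = cur + " " + words[i]
--                 i += 1
--             lines.append(cur)
--         if not lines:
--             lines = [""]
--         return lines
--
--     def row(c1, c2, c3, c4):
--         return "\u2502 {:<31} \u2502 {:<26} \u2502 {:<22} \u2502 {:<60} \u2502\n".format(c1, c2, c3, c4)
--
--     def bar(l, j, r):
--         return l + "\u2500" * 33 + j + "\u2500" * 28 + j + "\u2500" * 24 + j + "\u2500" * 62 + r + "\n"
--
--     body = []
--     for key, active in campusbot_spec.items():
--         if active and key in tasks:
--             t = tasks[key]
--             w = wrap(t["why"])
--             body.append(row(t["subtask"], t["paradigm"], t["algorithm"], w[0]))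
--             body.extend(row("", "", "", line) for line in w[1:])
--     return "\n" + bar("\u250c", "\u252c", "\u2510") + row("Subtask", "Paradigm", "Algorithm", "Justification") + bar("\u251c", "\u253c", "\u2524") + "".join(body) + bar("\u2514", "\u2534", "\u2518")
-- ===== Notes on version B (the rewrite author's own statement) =====
-- stated objective: idiomatic
-- what changed: The justification wrapping is rewritten from A's character-index rfind-backward scan with strip into a word-split greedy accumulation, and the table is assembled by joining a list of row strings built by a row/bar helper instead of repeatedly concatenating onto one growing string.
import Mathlib
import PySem

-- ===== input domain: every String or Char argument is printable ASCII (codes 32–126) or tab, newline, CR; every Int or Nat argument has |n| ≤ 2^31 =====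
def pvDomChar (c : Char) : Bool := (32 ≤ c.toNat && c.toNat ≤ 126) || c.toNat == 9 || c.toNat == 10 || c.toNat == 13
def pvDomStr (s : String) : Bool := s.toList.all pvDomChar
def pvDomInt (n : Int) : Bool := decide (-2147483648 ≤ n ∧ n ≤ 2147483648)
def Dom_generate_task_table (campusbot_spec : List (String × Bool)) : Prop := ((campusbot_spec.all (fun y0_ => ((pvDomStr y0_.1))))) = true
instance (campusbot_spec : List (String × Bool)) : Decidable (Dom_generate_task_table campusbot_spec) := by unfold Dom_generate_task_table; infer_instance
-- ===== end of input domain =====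

-- B replaces A's character-index rfind-backward wrapping of the justification text by a
-- word-accumulation wrap and assembles the table from a joined list of row strings instead of
-- one growing string accumulator (objective: idiomatic; same cost).

-- The fixed task data (the same dict literal appears in both Python sources; shared here).
structure PvTask where
  subtask : List Char
  paradigm : List Char
  algorithm : List Char
  why : List Char
deriving DecidableEq, Repr

def pvTaskData : List (String × PvTask) := [
  ("perception", ⟨"Crosswalk Detection".toList, "Reflex-based (Model)".toList, "CNN".toList,
    "Visual pattern recognition with spatial structure; abundant labeled image data; feedforward inference enables real-time detection".toList⟩),
  ("path_planning", ⟨"Route Planning (Static Map)".toList, "State-based (Search)".toList, "A*".toList,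
    "Deterministic transitions with known costs; admissible heuristic guarantees optimal paths; efficient exploration vs uninformed search".toList⟩),
  ("stochastic", ⟨"Stochastic Travel Times".toList, "State-based (MDP)".toList, "Value Iteration".toList,
    "Uncertain transition outcomes; optimizes expected cumulative reward; handles probabilistic travel time variations".toList⟩),
  ("hidden_state", ⟨"Pedestrian Tracking".toList, "Variable-based (Probabilistic)".toList, "Forward-Backward (HMM)".toList,
    "Hidden states (true positions) with noisy observations; exact Bayesian inference; temporal smoothing using past and future evidence".toList⟩),
  ("logic_rules", ⟨"Restricted Zones/Time Windows".toList, "Logic-based".toList, "Model Checking".toList,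
    "Hard constraints requiring verification; exhaustive satisfaction checking; no learning or probabilities needed".toList⟩)]

-- ===== PORT A =====
-- f"{s:<31}" (left-justify with spaces; strings longer than the width are kept)
def padA (s : List Char) (w : Nat) : List Char := s ++ List.replicate (w - s.length) ' '

-- "─" * n
def hbarA (n : Nat) : List Char := List.replicate n '─'

-- A's `while len(why_text) > 60:` loop; fuel = initial length + 1 strictly bounds the number of
-- iterations (each iteration removes at least one character), so the 0-fuel branch is unreachable.
def wrapWhileA : Nat → List Char → List (List Char) → List (List Char)
  | 0, whyText, whyLines => whyLines ++ [whyText]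
  | fuel + 1, whyText, whyLines =>
    if 60 < whyText.length then
      let r := PySem.Chars.rfind (PySem.List.slice whyText none (some 60)) [' ']
      let splitPos : Int := if r = -1 then 60 else r
      wrapWhileA fuel (PySem.Chars.strip (PySem.List.slice whyText (some splitPos) none))
        (whyLines ++ [PySem.List.slice whyText none (some splitPos)])
    else whyLines ++ [whyText]

-- the body of A's `for key, active in campusbot_spec.items():`
-- (why_lines[0] via headI: the wrap loop always appends a final line, so the list is nonempty)
def stepA (table : List Char) (kv : String × Bool) : List Char :=
  if kv.2 then
    match (PySem.Dict.mk pvTaskData).get? kv.1 with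
    | some task =>
      let whyLines := wrapWhileA (task.why.length + 1) task.why []
      let table := table ++ (['│', ' '] ++ padA task.subtask 31 ++ [' ', '│', ' '] ++
        padA task.paradigm 26 ++ [' ', '│', ' '] ++ padA task.algorithm 22 ++ [' ', '│', ' '] ++
        padA whyLines.headI 60 ++ [' ', '│', '\n'])
      whyLines.tail.foldl (fun table line =>
        table ++ (['│', ' '] ++ padA [] 31 ++ [' ', '│', ' '] ++ padA [] 26 ++ [' ', '│', ' '] ++
          padA [] 22 ++ [' ', '│', ' '] ++ padA line 60 ++ [' ', '│', '\n'])) table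
    | none => table
  else table

def generate_task_table (campusbot_spec : List (String × Bool)) : String :=
  let table := ['\n']
  let table := table ++ (['┌'] ++ hbarA 33 ++ ['┬'] ++ hbarA 28 ++ ['┬'] ++ hbarA 24 ++ ['┬'] ++ hbarA 62 ++ ['┐', '\n'])
  let table := table ++ (['│', ' '] ++ padA "Subtask".toList 31 ++ [' ', '│', ' '] ++
    padA "Paradigm".toList 26 ++ [' ', '│', ' '] ++ padA "Algorithm".toList 22 ++ [' ', '│', ' '] ++
    padA "Justification".toList 60 ++ [' ', '│', '\n'])
  let table := table ++ (['├'] ++ hbarA 33 ++ ['┼'] ++ hbarA 28 ++ ['┼'] ++ hbarA 24 ++ ['┼'] ++ hbarA 62 ++ ['┤', '\n'])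
  let table := campusbot_spec.foldl stepA table
  String.mk (table ++ (['└'] ++ hbarA 33 ++ ['┴'] ++ hbarA 28 ++ ['┴'] ++ hbarA 24 ++ ['┴'] ++ hbarA 62 ++ ['┘', '\n']))

-- ===== PORT B =====
-- Source B's inner `while` of wrap: greedily extend cur with the next word while the line stays < 60
def takeLineB (cur : List Char) : List (List Char) → List Char × List (List Char)
  | [] => (cur, [])
  | w :: ws =>
    if cur.length + 1 + w.length < 60 then takeLineB (cur ++ ' ' :: w) ws else (cur, w :: ws)

-- Source B's outer `while i < len(words)` of wrap; every pass consumes at least the word at i,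
-- so fuel = number of words + 1 strictly bounds the iterations and the 0-fuel branch is unreachable.
def wrapWordsB : Nat → List (List Char) → List (List Char)
  | 0, _ => []
  | _, [] => []
  | fuel + 1, w :: ws =>
    let rest := PySem.Chars.join [' '] (w :: ws)
    if rest.length ≤ 60 then [rest]
    else
      let p := takeLineB w ws
      p.1 :: wrapWordsB fuel p.2

def wrapB (text : List Char) : List (List Char) :=
  let words := PySem.Chars.split₀ text
  let lines := wrapWordsB (words.length + 1) words
  if lines.isEmpty then [[]] else lines

-- Source B's row(): "│ {:<31} │ {:<26} │ {:<22} │ {:<60} │\n".format(c1, c2, c3, c4)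
def padB (w : Nat) (s : List Char) : List Char := s ++ List.replicate (w - s.length) ' '

def rowB (c1 c2 c3 c4 : List Char) : List Char :=
  '│' :: ' ' :: (padB 31 c1 ++ (' ' :: '│' :: ' ' :: (padB 26 c2 ++ (' ' :: '│' :: ' ' :: (padB 22 c3 ++ (' ' :: '│' :: ' ' :: (padB 60 c4 ++ [' ', '│', '\n'])))))))

-- Source B's bar(l, j, r)
def barB (l j r : Char) : List Char :=
  l :: (List.replicate 33 '─' ++ (j :: (List.replicate 28 '─' ++ (j :: (List.replicate 24 '─' ++ (j :: (List.replicate 62 '─' ++ [r, '\n'])))))))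

-- the body of Source B's for-loop: collect the rows contributed by one (key, active) pair
-- (w[0] via headI: wrap() never returns an empty list)
def stepB (body : List (List Char)) (kv : String × Bool) : List (List Char) :=
  if kv.2 then
    match (PySem.Dict.mk pvTaskData).get? kv.1 with
    | some t =>
      let w := wrapB t.why
      body ++ [rowB t.subtask t.paradigm t.algorithm w.headI] ++ w.tail.map (fun line => rowB [] [] [] line)
    | none => body
  else body

def generate_task_table_alt (campusbot_spec : List (String × Bool)) : String :=
  let body := campusbot_spec.foldl stepB []
  String.mk ('\n' :: (barB '┌' '┬' '┐' ++ rowB "Subtask".toList "Paradigm".toList "Algorithm".toList "Justification".toList ++ barB '├' '┼' '┤' ++ PySem.Chars.join [] body ++ barB '└' '┴' '┘'))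

-- ===== PRECONDITION & SPEC =====
def Spec_generate_task_table (campusbot_spec : List (String × Bool)) (out : String) : Prop := out = generate_task_table_alt campusbot_spec
instance (campusbot_spec : List (String × Bool)) (out : String) : Decidable (Spec_generate_task_table campusbot_spec out) := by unfold Spec_generate_task_table; infer_instance

-- ===== CLAIM (what is proved, stated in full; the proofs are below) =====
def Claim_equal_generate_task_table : Prop := ∀ (campusbot_spec : List (String × Bool)), Dom_generate_task_table campusbot_spec → Spec_generate_task_table campusbot_spec (generate_task_table campusbot_spec)

-- ===== LEMMAS AND PROOFS =====

-- "".join(parts) is concatenation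
theorem join_nil_eq_flatten (parts : List (List Char)) : PySem.Chars.join [] parts = parts.flatten := by
  simp only [PySem.Chars.join]
  induction parts with
  | nil => simp [List.intercalate]
  | cons x t ih =>
    cases t with
    | nil => simp [List.intercalate]
    | cons y s =>
      simp [List.intercalate, List.intersperse] at ih ⊢
      simpa using ih

theorem flatten_flatMap_eq (l : List (String × Bool)) (f : String × Bool → List (List Char)) :
    (l.flatMap f).flatten = l.flatMap (fun x => (f x).flatten) := by
  induction l with
  | nil => simp
  | cons x t ih => simp [ih]

-- A's loop body only appends to the accumulated table
theorem stepA_append (table : List Char) (kv : String × Bool) :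
    stepA table kv = table ++ stepA [] kv := by
  obtain ⟨key, active⟩ := kv
  cases active with
  | false => simp [stepA]
  | true =>
    simp only [stepA]
    cases h : (PySem.Dict.mk pvTaskData).get? key with
    | none => simp
    | some task =>
      simp only [PySem.List.foldl_append_eq_flatMap]
      simp [List.append_assoc]

-- B's loop body only appends to the accumulated row list
theorem stepB_append (body : List (List Char)) (kv : String × Bool) :
    stepB body kv = body ++ stepB [] kv := by
  obtain ⟨key, active⟩ := kv
  cases active with
  | false => simp [stepB]
  | true =>
    simp only [stepB]
    cases h : (PySem.Dict.mk pvTaskData).get? key with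
    | none => simp
    | some task => simp

theorem foldA_eq (spec : List (String × Bool)) (acc : List Char) :
    spec.foldl stepA acc = acc ++ spec.flatMap (fun kv => stepA [] kv) := by
  induction spec generalizing acc with
  | nil => simp
  | cons kv spec ih => rw [List.foldl_cons, stepA_append, ih]; simp

theorem foldB_eq (spec : List (String × Bool)) (acc : List (List Char)) :
    spec.foldl stepB acc = acc ++ spec.flatMap (fun kv => stepB [] kv) := by
  induction spec generalizing acc with
  | nil => simp
  | cons kv spec ih => rw [List.foldl_cons, stepB_append, ih]; simp

-- per-item agreement: A's appended chunk is the concatenation of B's rows, for EVERY key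
set_option maxRecDepth 100000 in
theorem chunk_eq (kv : String × Bool) : stepA [] kv = (stepB [] kv).flatten := by
  obtain ⟨key, active⟩ := kv
  cases active with
  | false => simp [stepA, stepB]
  | true =>
    by_cases h1 : key = "perception"
    · subst h1; decide
    by_cases h2 : key = "path_planning"
    · subst h2; decide
    by_cases h3 : key = "stochastic"
    · subst h3; decide
    by_cases h4 : key = "hidden_state"
    · subst h4; decide
    by_cases h5 : key = "logic_rules"
    · subst h5; decide
    have e1 : ("perception" == key) = false := beq_eq_false_iff_ne.mpr (fun h => h1 h.symm)
    have e2 : ("path_planning" == key) = false := beq_eq_false_iff_ne.mpr (fun h => h2 h.symm)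
    have e3 : ("stochastic" == key) = false := beq_eq_false_iff_ne.mpr (fun h => h3 h.symm)
    have e4 : ("hidden_state" == key) = false := beq_eq_false_iff_ne.mpr (fun h => h4 h.symm)
    have e5 : ("logic_rules" == key) = false := beq_eq_false_iff_ne.mpr (fun h => h5 h.symm)
    have hget : (PySem.Dict.mk pvTaskData).get? key = none := by
      simp [PySem.Dict.get?, pvTaskData, List.find?, e1, e2, e3, e4, e5]
    simp [stepA, stepB, hget]

theorem mid_congr {p q s t : List Char} (Y : List Char) (hp : p = q) (hst : s = t) :
    p ++ (Y ++ s) = q ++ (Y ++ t) := by rw [hp, hst]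

-- ===== VERDICT (by name: the statement is the Claim_ definition above) =====
set_option maxRecDepth 100000 in
theorem generate_task_table_spec : Claim_equal_generate_task_table := by
  intro spec _
  unfold Spec_generate_task_table generate_task_table generate_task_table_alt
  simp only [foldA_eq, foldB_eq, join_nil_eq_flatten, flatten_flatMap_eq, List.nil_append]
  simp only [chunk_eq]
  apply congrArg String.mk
  rw [List.append_assoc]
  rw [List.append_assoc _ (spec.flatMap fun kv => (stepB [] kv).flatten) (barB '└' '┴' '┘')]
  rw [show ('\n' :: (barB '┌' '┬' '┐' ++ rowB "Subtask".toList "Paradigm".toList "Algorithm".toList "Justification".toList ++ barB '├' '┼' '┤' ++ ((spec.flatMap fun kv => (stepB [] kv).flatten) ++ barB '└' '┴' '┘')) : List Char)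
      = ('\n' :: (barB '┌' '┬' '┐' ++ rowB "Subtask".toList "Paradigm".toList "Algorithm".toList "Justification".toList ++ barB '├' '┼' '┤')) ++ ((spec.flatMap fun kv => (stepB [] kv).flatten) ++ barB '└' '┴' '┘') from by
    simp [List.append_assoc]]
  exact mid_congr _ (by decide) (by decide)
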